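-- pv_equiv track=rewrite | github.com/minhthe/minhthe.007-gmail.com | Codility/15_Caterpillar/cntSlice100.py | solution
-- ===== SOURCE A (Python) =====
-- def solution(M, A):
-- 	rst = 0
-- 	start = 0
-- 	duplicate =  0
-- 	n = len(A)
-- 	mp = {}
-- 	for i, v in enumerate(A):
-- 		if v > M:
-- 			rst += (i-start)*(i-start+1)//2
-- 			start = i + 1
-- 			continue
-- 		if v not in mp:
-- 			mp[v] = i
-- 		else:
-- 			if mp[v] >= start:
--
-- 				rst += (i-start)*(i-start+1)//2
-- 				start = mp[v] + 1
-- 				if start < i: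
-- 					duplicate += (i - start) * (i - start + 1) //2
-- 			mp[v] = i
-- 	rst += (n-start)*(n-start+1)//2
-- 	return rst - duplicate
-- ===== SOURCE B (Python) =====
-- def solution(M, A):
--     total = 0
--     front = 0
--     last = {}
--     for i, v in enumerate(A):
--         if v > M:
--             front = i + 1
--             continue
--         j = last.get(v)
--         if j is not None and j >= front:
--             front = j + 1
--         last[v] = i
--         total += i - front + 1
--     return total
-- ===== Notes on version B (the rewrite author's own statement) =====
-- stated objective: simpler
-- what changed: Replaces A's triangular-sum-minus-duplicate bookkeeping (four state variables, closed-form block sums added at every window reset plus a separate overlap correction subtracted at the end) with the classic caterpillar that just adds the current distinct-window length i-front+1 at each position.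
import Mathlib
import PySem

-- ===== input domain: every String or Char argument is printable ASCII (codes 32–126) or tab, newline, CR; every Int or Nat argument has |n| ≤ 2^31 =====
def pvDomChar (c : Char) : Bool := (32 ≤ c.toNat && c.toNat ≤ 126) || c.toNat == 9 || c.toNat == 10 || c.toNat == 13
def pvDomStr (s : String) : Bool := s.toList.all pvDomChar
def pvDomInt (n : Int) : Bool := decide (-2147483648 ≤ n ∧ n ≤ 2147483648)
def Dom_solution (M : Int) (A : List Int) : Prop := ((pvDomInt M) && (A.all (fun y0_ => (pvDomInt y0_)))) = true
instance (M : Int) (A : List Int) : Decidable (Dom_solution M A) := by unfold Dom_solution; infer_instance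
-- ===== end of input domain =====

-- B replaces A's triangular-sum-plus-duplicate-correction accounting with the plain
-- caterpillar that adds the current distinct-window length at every position (simpler).

-- ===== PORT A =====
-- state: (rst, start, duplicate, mp)
def solutionStep (M : Int) (st : Int × Int × Int × PySem.Dict Int Int)
    (p : Int × Int) : Int × Int × Int × PySem.Dict Int Int :=
  let (rst, start, dup, mp) := st
  let (i, v) := p
  if v > M then
    (rst + PySem.Int.floordiv ((i - start) * (i - start + 1)) 2, i + 1, dup, mp)
  else
    match mp.get? v with
    | none => (rst, start, dup, mp.insert v i)
    | some j =>
      if j ≥ start then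
        let rst' := rst + PySem.Int.floordiv ((i - start) * (i - start + 1)) 2
        let start' := j + 1
        let dup' := if start' < i then
            dup + PySem.Int.floordiv ((i - start') * (i - start' + 1)) 2 else dup
        (rst', start', dup', mp.insert v i)
      else (rst, start, dup, mp.insert v i)

def solution (M : Int) (A : List Int) : Int :=
  let n : Int := A.length
  let st := (PySem.List.enumerate A 0).foldl (solutionStep M) (0, 0, 0, PySem.Dict.empty)
  st.1 + PySem.Int.floordiv ((n - st.2.1) * (n - st.2.1 + 1)) 2 - st.2.2.1

-- ===== PORT B =====
-- state: (total, front, last)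
def solutionAltStep (M : Int) (st : Int × Int × PySem.Dict Int Int)
    (p : Int × Int) : Int × Int × PySem.Dict Int Int :=
  let (total, front, last) := st
  let (i, v) := p
  if v > M then (total, i + 1, last)
  else
    let front' := match last.get? v with
      | some j => if j ≥ front then j + 1 else front
      | none => front
    (total + (i - front' + 1), front', last.insert v i)

def solution_alt (M : Int) (A : List Int) : Int :=
  ((PySem.List.enumerate A 0).foldl (solutionAltStep M) (0, 0, PySem.Dict.empty)).1

-- ===== PRECONDITION & SPEC =====
def Spec_solution (M : Int) (A : List Int) (out : Int) : Prop := out = solution_alt M A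
instance (M : Int) (A : List Int) (out : Int) : Decidable (Spec_solution M A out) := by unfold Spec_solution; infer_instance

-- ===== CLAIM (what is proved, stated in full; the proofs are below) =====
def Claim_equal_solution : Prop := ∀ (M : Int) (A : List Int), Dom_solution M A → Spec_solution M A (solution M A)

-- ===== LEMMAS AND PROOFS =====

-- triangle number via Int (Euclidean) division; the ports' floordiv coincides with it
def pvTri (k : Int) : Int := k * (k + 1) / 2

theorem pvTri_floordiv (k : Int) : PySem.Int.floordiv (k * (k + 1)) 2 = pvTri k := by
  rw [PySem.Int.floordiv_eq_ediv_of_pos (by norm_num)]; rfl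

theorem pvTri_succ (k : Int) : pvTri (k + 1) = pvTri k + (k + 1) := by
  unfold pvTri
  have h : (k + 1) * (k + 1 + 1) = k * (k + 1) + (k + 1) * 2 := by ring
  rw [h, Int.add_mul_ediv_right _ _ (by norm_num)]

theorem pvTri_zero : pvTri 0 = 0 := rfl

-- the loop invariant: B's running total equals A's rst - duplicate + tri(window length)
theorem pv_loop (vs : List Int) : ∀ (M s rst start dup total : Int) (mp : PySem.Dict Int Int),
    start ≤ s →
    (∀ v j, mp.get? v = some j → j < s) →
    total = rst - dup + pvTri (s - start) →
    (let stA := (PySem.List.enumerate vs s).foldl (solutionStep M) (rst, start, dup, mp);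
     let stB := (PySem.List.enumerate vs s).foldl (solutionAltStep M) (total, start, mp);
     stB.1 = stA.1 - stA.2.2.1 + pvTri ((s + vs.length) - stA.2.1) ∧ stB.2.1 = stA.2.1) := by
  induction vs with
  | nil =>
    intro M s rst start dup total mp hs hmp hinv
    simpa [PySem.List.enumerate] using hinv
  | cons v vs ih =>
    intro M s rst start dup total mp hs hmp hinv
    rw [PySem.List.enumerate_cons]
    simp only [List.foldl_cons]
    by_cases hM : v > M
    · -- reset: both set front/start to s+1; A banks tri(s-start)
      have h1 : solutionStep M (rst, start, dup, mp) (s, v)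
          = (rst + PySem.Int.floordiv ((s - start) * (s - start + 1)) 2, s + 1, dup, mp) := by
        simp [solutionStep, hM]
      have h2 : solutionAltStep M (total, start, mp) (s, v) = (total, s + 1, mp) := by
        simp [solutionAltStep, hM]
      rw [h1, h2]
      have := ih M (s + 1) (rst + PySem.Int.floordiv ((s - start) * (s - start + 1)) 2)
        (s + 1) dup total mp (le_refl _)
        (fun v j h => lt_trans (hmp v j h) (by omega))
        (by rw [pvTri_floordiv, hinv, show s + 1 - (s + 1) = (0:Int) by ring, pvTri_zero]; ring)
      simpa [List.length_cons,
        show s + 1 + (vs.length : Int) = s + (↑vs.length + 1) by ring] using this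
    · cases hget : mp.get? v with
      | none =>
        have h1 : solutionStep M (rst, start, dup, mp) (s, v) = (rst, start, dup, mp.insert v s) := by
          simp [solutionStep, hM, hget]
        have h2 : solutionAltStep M (total, start, mp) (s, v)
            = (total + (s - start + 1), start, mp.insert v s) := by
          simp [solutionAltStep, hM, hget]
        rw [h1, h2]
        have := ih M (s + 1) rst start dup (total + (s - start + 1)) (mp.insert v s)
          (by omega)
          (by intro w j h
              rw [PySem.Dict.get?_insert] at h
              split at h
              · injection h with h; omega
              · exact lt_trans (hmp w j h) (by omega))
          (by rw [hinv, show s + 1 - start = (s - start) + 1 by ring, pvTri_succ]; ring)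
        simpa [List.length_cons,
          show s + 1 + (vs.length : Int) = s + (↑vs.length + 1) by ring] using this
      | some j =>
        have hj : j < s := hmp v j hget
        by_cases hjs : j ≥ start
        · -- duplicate inside window
          have h1 : solutionStep M (rst, start, dup, mp) (s, v)
              = (rst + PySem.Int.floordiv ((s - start) * (s - start + 1)) 2, j + 1,
                 (if j + 1 < s then
                    dup + PySem.Int.floordiv ((s - (j + 1)) * (s - (j + 1) + 1)) 2 else dup),
                 mp.insert v s) := by
            simp [solutionStep, hM, hget, hjs]
          have h2 : solutionAltStep M (total, start, mp) (s, v)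
              = (total + (s - (j + 1) + 1), j + 1, mp.insert v s) := by
            simp [solutionAltStep, hM, hget, hjs]
          rw [h1, h2]
          have hdup : (if j + 1 < s then
              dup + PySem.Int.floordiv ((s - (j + 1)) * (s - (j + 1) + 1)) 2 else dup)
              = dup + pvTri (s - (j + 1)) := by
            split
            · rw [pvTri_floordiv]
            · have : s - (j + 1) = 0 := by omega
              rw [this, pvTri_zero]; ring
          rw [hdup]
          have hinv' : total + (s - (j + 1) + 1)
              = (rst + PySem.Int.floordiv ((s - start) * (s - start + 1)) 2)
                - (dup + pvTri (s - (j + 1))) + pvTri (s + 1 - (j + 1)) := by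
            rw [pvTri_floordiv, hinv,
              show s + 1 - (j + 1) = (s - (j + 1)) + 1 by ring, pvTri_succ]
            ring
          have := ih M (s + 1) (rst + PySem.Int.floordiv ((s - start) * (s - start + 1)) 2)
            (j + 1) (dup + pvTri (s - (j + 1))) (total + (s - (j + 1) + 1)) (mp.insert v s)
            (by omega)
            (by intro w j' h
                rw [PySem.Dict.get?_insert] at h
                split at h
                · injection h with h; omega
                · exact lt_trans (hmp w j' h) (by omega))
            hinv'
          simpa [List.length_cons,
            show s + 1 + (vs.length : Int) = s + (↑vs.length + 1) by ring] using this
        · -- stale duplicate: behaves like a fresh value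
          have h1 : solutionStep M (rst, start, dup, mp) (s, v) = (rst, start, dup, mp.insert v s) := by
            simp [solutionStep, hM, hget, hjs]
          have h2 : solutionAltStep M (total, start, mp) (s, v)
              = (total + (s - start + 1), start, mp.insert v s) := by
            simp [solutionAltStep, hM, hget, hjs]
          rw [h1, h2]
          have := ih M (s + 1) rst start dup (total + (s - start + 1)) (mp.insert v s)
            (by omega)
            (by intro w j' h
                rw [PySem.Dict.get?_insert] at h
                split at h
                · injection h with h; omega
                · exact lt_trans (hmp w j' h) (by omega))
            (by rw [hinv, show s + 1 - start = (s - start) + 1 by ring, pvTri_succ]; ring)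
          simpa [List.length_cons,
            show s + 1 + (vs.length : Int) = s + (↑vs.length + 1) by ring] using this

-- ===== VERDICT (by name: the statement is the Claim_ definition above) =====
theorem solution_spec : Claim_equal_solution := by
  intro M A _
  have h := pv_loop A M 0 0 0 0 0 PySem.Dict.empty (le_refl 0)
    (by intro v j h; simp [PySem.Dict.get?_empty] at h)
    (by simp [pvTri_zero])
  simp only [zero_add] at h
  simp only [Spec_solution, solution, solution_alt, pvTri_floordiv]
  rw [h.1]; ring
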